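-- pv_equiv track=rewrite | github.com/offbynull/offbynull.github.io | docs/data/learn/Bioinformatics/output/ch9_code/src/Stepik.9.13.CodeChallenge.BurrowsWheelerMatching_CheckpointArrays.py | sa_cmp
-- ===== SOURCE A (Python) =====
-- def sa_cmp(v1: tuple[int, str], v2: tuple[int, str]):
--     a = v1[1]
--     b = v2[1]
--     for a_ch, b_ch in zip(a, b):
--         if a_ch == '$' and b_ch == '$':
--             continue
--         if a_ch == '$':
--             return -1
--         if b_ch == '$':
--             return 1
--         if a_ch < b_ch:
--             return -1
--         if a_ch > b_ch:
--             return 1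
--     if len(a) < len(b):
--         return -1
--     elif len(b) < len(a):
--         return 1
--     raise '???'  # return 0
-- ===== SOURCE B (Python) =====
-- def sa_cmp(v1: tuple[int, str], v2: tuple[int, str]):
--     # Transform-then-compare: map '$' to rank 0 and every other char to ord+1,
--     # then use Python's built-in lexicographic list comparison.
--     ka = [0 if c == '$' else ord(c) + 1 for c in v1[1]]
--     kb = [0 if c == '$' else ord(c) + 1 for c in v2[1]]
--     if ka == kb:
--         raise '???'  # return 0
--     return -1 if ka < kb else 1
-- ===== Notes on version B (the rewrite author's own statement) =====
-- stated objective: idiomatic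
-- what changed: Replaces the manual short-circuit branching loop plus length comparison by mapping each string to a rank list ('$'->0, c->ord(c)+1) and comparing the two rank lists with Python's built-in lexicographic list comparison.
import Mathlib
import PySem

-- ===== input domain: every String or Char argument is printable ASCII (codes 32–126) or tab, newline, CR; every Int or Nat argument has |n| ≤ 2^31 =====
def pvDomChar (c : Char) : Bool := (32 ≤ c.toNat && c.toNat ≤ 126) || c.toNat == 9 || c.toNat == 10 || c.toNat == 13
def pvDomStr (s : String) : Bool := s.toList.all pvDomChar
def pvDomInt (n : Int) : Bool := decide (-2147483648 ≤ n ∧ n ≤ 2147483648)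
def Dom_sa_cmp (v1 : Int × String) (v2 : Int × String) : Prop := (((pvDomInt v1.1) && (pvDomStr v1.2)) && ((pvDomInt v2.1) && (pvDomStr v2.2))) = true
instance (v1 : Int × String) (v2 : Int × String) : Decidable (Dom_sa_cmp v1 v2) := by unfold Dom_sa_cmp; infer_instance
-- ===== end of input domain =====

-- B replaces A's branching loop by a rank-list transform ('$'→0, c→ord(c)+1) compared
-- lexicographically (idiomatic). Both raise on equal strings; Pre_ excludes that case.

-- ===== PORT A =====
-- A's zip loop with its branch order, then the length comparison; equal strings (Python raise) → 0 (excluded by Pre_)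
def saCmpLoop : List Char → List Char → Int
  | a_ch :: as, b_ch :: bs =>
    if a_ch = '$' ∧ b_ch = '$' then saCmpLoop as bs
    else if a_ch = '$' then -1
    else if b_ch = '$' then 1
    else if a_ch < b_ch then -1
    else if b_ch < a_ch then 1
    else saCmpLoop as bs
  | as, bs =>
    if as.length < bs.length then -1
    else if bs.length < as.length then 1
    else 0

def sa_cmp (v1 : Int × String) (v2 : Int × String) : Int :=
  saCmpLoop v1.2.toList v2.2.toList

-- ===== PORT B =====
def saKey (s : List Char) : List Int :=
  s.map (fun c => if c = '$' then 0 else (c.toNat : Int) + 1)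

-- Python's lexicographic '<' on int lists
def lexLt : List Int → List Int → Bool
  | [], [] => false
  | [], _ :: _ => true
  | _ :: _, [] => false
  | x :: xs, y :: ys => if x < y then true else if y < x then false else lexLt xs ys

def sa_cmp_alt (v1 : Int × String) (v2 : Int × String) : Int :=
  let ka := saKey v1.2.toList
  let kb := saKey v2.2.toList
  if ka = kb then 0  -- Python raise '???' (excluded by Pre_)
  else if lexLt ka kb then -1 else 1

-- ===== PRECONDITION & SPEC =====
-- Pre_ excludes equal second components, on which the Python A (and B) raise and return nothing.
def Pre_sa_cmp (v1 : Int × String) (v2 : Int × String) : Prop := v1.2 ≠ v2.2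
instance (v1 : Int × String) (v2 : Int × String) : Decidable (Pre_sa_cmp v1 v2) := by unfold Pre_sa_cmp; infer_instance

def pvWitness_sa_cmp : (Int × String) × (Int × String) := ((0, "ban$"), (1, "an$b"))

def Spec_sa_cmp (v1 : Int × String) (v2 : Int × String) (out : Int) : Prop := out = sa_cmp_alt v1 v2
instance (v1 : Int × String) (v2 : Int × String) (out : Int) : Decidable (Spec_sa_cmp v1 v2 out) := by unfold Spec_sa_cmp; infer_instance

-- ===== CLAIM (what is proved, stated in full; the proofs are below) =====
def Claim_equal_sa_cmp : Prop := ∀ (v1 : Int × String) (v2 : Int × String), Dom_sa_cmp v1 v2 → Pre_sa_cmp v1 v2 → Spec_sa_cmp v1 v2 (sa_cmp v1 v2)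

-- ===== LEMMAS AND PROOFS =====

lemma char_toNat_lt {a b : Char} (h : a < b) : a.toNat < b.toNat :=
  UInt32.lt_iff_toNat_lt.mp (Char.lt_def.mp h)

-- the rank map is injective on chars, so unequal char lists give unequal key lists
lemma saKey_inj : ∀ {as bs : List Char}, saKey as = saKey bs → as = bs := by
  intro as
  induction as with
  | nil =>
    intro bs h
    cases bs with
    | nil => rfl
    | cons b bs => simp [saKey] at h
  | cons a as ih =>
    intro bs h
    cases bs with
    | nil => simp [saKey] at h
    | cons b bs =>
      simp only [saKey, List.map_cons, List.cons.injEq] at h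
      obtain ⟨h1, h2⟩ := h
      have hab : a = b := by
        by_cases ha : a = '$' <;> by_cases hb : b = '$' <;> simp [ha, hb] at h1
        · rw [ha, hb]
        · exfalso; omega
        · exfalso; omega
        · have hn : a.toNat = b.toNat := by omega
          exact Char.ext (UInt32.toNat_inj.mp hn)
      rw [hab, ih (by simpa [saKey] using h2)]

-- main loop lemma: on unequal char lists, A's loop equals B's key comparison
lemma saCmpLoop_eq_lex : ∀ (as bs : List Char), as ≠ bs →
    saCmpLoop as bs = if lexLt (saKey as) (saKey bs) then -1 else 1 := by
  intro as
  induction as with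
  | nil =>
    intro bs hne
    cases bs with
    | nil => exact absurd rfl hne
    | cons b bs => simp [saCmpLoop, saKey, lexLt]
  | cons a as ih =>
    intro bs hne
    cases bs with
    | nil => simp [saCmpLoop, saKey, lexLt]
    | cons b bs =>
      by_cases ha : a = '$' <;> by_cases hb : b = '$'
      · -- both '$': recurse; tails unequal since heads equal
        have htl : as ≠ bs := fun h => hne (by rw [ha, hb, h])
        simp only [saCmpLoop, saKey, List.map_cons, lexLt, ha, hb, and_self, if_true, lt_irrefl, if_false]
        simpa [saKey] using ih bs htl
      · have hk : (0:Int) < (b.toNat:Int) + 1 := by omega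
        simp [saCmpLoop, lexLt, saKey, ha, hb, hk]
      · have h1 : ¬ ((a.toNat:Int) + 1 < 0) := by omega
        have h2 : (0:Int) < (a.toNat:Int) + 1 := by omega
        simp [saCmpLoop, lexLt, saKey, ha, hb, h1, h2]
      · by_cases hlt : a < b
        · have hk : (a.toNat:Int) + 1 < (b.toNat:Int) + 1 := by
            have := char_toNat_lt hlt; omega
          simp [saCmpLoop, lexLt, saKey, ha, hb, hlt, hk]
        · by_cases hgt : b < a
          · have hk1 : ¬ ((a.toNat:Int) + 1 < (b.toNat:Int) + 1) := by
              have := char_toNat_lt hgt; omega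
            have hk2 : (b.toNat:Int) + 1 < (a.toNat:Int) + 1 := by
              have := char_toNat_lt hgt; omega
            simp [saCmpLoop, lexLt, saKey, ha, hb, hlt, hgt, hk1, hk2]
          · have hab : a = b := le_antisymm (not_lt.mp hgt) (not_lt.mp hlt)
            subst hab
            have htl : as ≠ bs := fun h => hne (by rw [h])
            simp only [saCmpLoop, saKey, List.map_cons, lexLt, ha, and_self,
              lt_irrefl, if_false]
            simpa [saKey] using ih bs htl

-- ===== VERDICT (by name: the statement is the Claim_ definition above) =====
theorem sa_cmp_spec : Claim_equal_sa_cmp := by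
  intro v1 v2 _ hpre
  have hne : v1.2.toList ≠ v2.2.toList := fun h => hpre (String.toList_inj.mp h)
  have hkey : saKey v1.2.toList ≠ saKey v2.2.toList := fun h => hne (saKey_inj h)
  unfold Spec_sa_cmp sa_cmp sa_cmp_alt
  simp only [hkey, if_false]
  exact saCmpLoop_eq_lex _ _ hne
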